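-- pv_equiv track=rewrite | github.com/Lochindaal/occpReplicationPackage | protocol/sequence/sequence_analyzer.py | check_outgoing_quorum
-- ===== SOURCE A (Python) =====
-- def check_outgoing_quorum(task_sequences):
--     output_map = {x[0]: {} for x in task_sequences}
--
--     for sequence in task_sequences:
--         # outgoing
--         elem = output_map.get(sequence[0])
--         if sequence[1] in elem:
--             elem[sequence[1]] += 1
--         else:
--             elem.update({sequence[1]: 1})
--
--     quorum_sequence = set()
--     conflicts = set()
--     for inp, targets in output_map.items():
--         max_keys = [
--             key for key, value in targets.items() if value == max(targets.values())
--         ]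
--
--         if len(max_keys) > 1:
--             conflicts.add(inp)
--         else:
--             quorum_output = max_keys[0]
--             quorum_sequence.add((inp, quorum_output))
--
--     return conflicts, quorum_sequence
-- ===== SOURCE B (Python) =====
-- def check_outgoing_quorum(task_sequences):
--     # One pass to group output counts per input, then a single streaming
--     # max-with-tie scan per group (instead of recomputing max() for every key).
--     counts = {}
--     for seq in task_sequences:
--         inner = counts.setdefault(seq[0], {})
--         inner[seq[1]] = inner.get(seq[1], 0) + 1
--
--     conflicts = set()
--     quorum = set()
--     for inp, targets in counts.items():
--         items = iter(targets.items())
--         best_key, best_count = next(items)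
--         tie = False
--         for key, value in items:
--             if value > best_count:
--                 best_key, best_count, tie = key, value, False
--             elif value == best_count:
--                 tie = True
--         if tie:
--             conflicts.add(inp)
--         else:
--             quorum.add((inp, best_key))
--     return conflicts, quorum
-- ===== Notes on version B (the rewrite author's own statement) =====
-- stated objective: alternative
-- what changed: B builds the per-input count table in one setdefault pass (instead of A's pre-seeding dict comprehension plus a second pass) and decides quorum/conflict per group with a single streaming max-with-tie scan instead of A's recomputing max(values) for every key and collecting all argmax keys.
import Mathlib
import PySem

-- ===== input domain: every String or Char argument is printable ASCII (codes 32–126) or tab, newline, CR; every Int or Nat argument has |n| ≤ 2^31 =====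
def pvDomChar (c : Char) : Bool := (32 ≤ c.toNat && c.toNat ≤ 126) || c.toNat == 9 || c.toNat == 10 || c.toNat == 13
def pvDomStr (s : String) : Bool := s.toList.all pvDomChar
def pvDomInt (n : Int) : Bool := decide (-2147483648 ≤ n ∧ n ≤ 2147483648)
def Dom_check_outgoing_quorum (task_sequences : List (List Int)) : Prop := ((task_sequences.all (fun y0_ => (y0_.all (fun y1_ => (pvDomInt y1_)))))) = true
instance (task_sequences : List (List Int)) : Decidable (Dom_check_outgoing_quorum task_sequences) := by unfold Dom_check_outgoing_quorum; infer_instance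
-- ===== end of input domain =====

-- B replaces A's per-group "recompute max() for every key, then collect all argmax keys"
-- by a single streaming max-with-tie scan per group (objective: alternative; return-value equivalence).


-- ===== PORT A =====
-- {x[0]: {} for x in task_sequences}
def aKeyStep (d : PySem.Dict Int (PySem.Dict Int Int)) (x : List Int) : PySem.Dict Int (PySem.Dict Int Int) :=
  d.insert (PySem.List.pyGetD x 0 0) PySem.Dict.empty

-- body of the counting loop: elem = output_map.get(sequence[0]); elem[sequence[1]] += 1 / elem.update({sequence[1]: 1})
def aCountStep (d : PySem.Dict Int (PySem.Dict Int Int)) (s : List Int) : PySem.Dict Int (PySem.Dict Int Int) :=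
  let s0 := PySem.List.pyGetD s 0 0
  let s1 := PySem.List.pyGetD s 1 0
  let elem := d.getD s0 PySem.Dict.empty
  let elem' := if elem.contains s1 then elem.modify s1 0 (· + 1) else elem.insert s1 1
  d.insert s0 elem'

-- body of the second loop: max_keys = [key for key, value in targets.items() if value == max(targets.values())]; …
def aGroupStep (acc : PySem.Set Int × PySem.Set (Int × Int)) (it : Int × PySem.Dict Int Int) :
    PySem.Set Int × PySem.Set (Int × Int) :=
  let max_keys := (it.2.items.filter
      (fun kv => kv.2 == (PySem.List.max? it.2.values (fun v => v)).getD 0)).map (·.1)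
  if max_keys.length > 1 then (PySem.Set.add acc.1 it.1, acc.2)
  else (acc.1, PySem.Set.add acc.2 (it.1, PySem.List.pyGetD max_keys 0 0))

def check_outgoing_quorum (task_sequences : List (List Int)) : List Int × (List (Int × Int)) :=
  let output_map0 := task_sequences.foldl aKeyStep PySem.Dict.empty
  let output_map := task_sequences.foldl aCountStep output_map0
  output_map.items.foldl aGroupStep (PySem.Set.empty, PySem.Set.empty)

-- ===== PORT B =====
-- body of the single build loop: inner = counts.setdefault(seq[0], {}); inner[seq[1]] = inner.get(seq[1], 0) + 1
def altStep (d : PySem.Dict Int (PySem.Dict Int Int)) (s : List Int) : PySem.Dict Int (PySem.Dict Int Int) :=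
  let s0 := PySem.List.pyGetD s 0 0
  let s1 := PySem.List.pyGetD s 1 0
  let inner := d.getD s0 PySem.Dict.empty
  d.insert s0 (inner.insert s1 (inner.getD s1 0 + 1))

-- body of the streaming max-with-tie scan over the remaining (key, value) pairs
def altScan (st : Int × Int × Bool) (kv : Int × Int) : Int × Int × Bool :=
  if kv.2 > st.2.1 then (kv.1, kv.2, false)
  else if kv.2 = st.2.1 then (st.1, st.2.1, true)
  else st

-- body of the second loop: best_key, best_count = next(items); tie = False; for key, value in items: …
def altGroupStep (acc : PySem.Set Int × PySem.Set (Int × Int)) (it : Int × PySem.Dict Int Int) :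
    PySem.Set Int × PySem.Set (Int × Int) :=
  match it.2.items with
  | [] => acc  -- unreachable: every group holds at least one count from the moment it is created
  | kv0 :: rest =>
    let st := rest.foldl altScan (kv0.1, kv0.2, false)
    if st.2.2 then (PySem.Set.add acc.1 it.1, acc.2)
    else (acc.1, PySem.Set.add acc.2 (it.1, st.1))

def check_outgoing_quorum_alt (task_sequences : List (List Int)) : List Int × (List (Int × Int)) :=
  let counts := task_sequences.foldl altStep PySem.Dict.empty
  counts.items.foldl altGroupStep (PySem.Set.empty, PySem.Set.empty)

-- ===== PRECONDITION & SPEC =====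
-- Python A raises IndexError (sequence[0] / sequence[1]) when some sequence has fewer than 2 entries.
def Pre_check_outgoing_quorum (task_sequences : List (List Int)) : Prop :=
  ∀ s ∈ task_sequences, 2 ≤ s.length
instance (task_sequences : List (List Int)) : Decidable (Pre_check_outgoing_quorum task_sequences) := by
  unfold Pre_check_outgoing_quorum; infer_instance

def pvWitness_check_outgoing_quorum : List (List Int) := [[1, 2], [1, 2], [1, 3], [4, 5]]

def Spec_check_outgoing_quorum (task_sequences : List (List Int)) (out : List Int × (List (Int × Int))) : Prop := out = check_outgoing_quorum_alt task_sequences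
instance (task_sequences : List (List Int)) (out : List Int × (List (Int × Int))) : Decidable (Spec_check_outgoing_quorum task_sequences out) := by unfold Spec_check_outgoing_quorum; infer_instance

-- ===== CLAIM (what is proved, stated in full; the proofs are below) =====
def Claim_equal_check_outgoing_quorum : Prop := ∀ (task_sequences : List (List Int)), Dom_check_outgoing_quorum task_sequences → Pre_check_outgoing_quorum task_sequences → Spec_check_outgoing_quorum task_sequences (check_outgoing_quorum task_sequences)

-- ===== LEMMAS AND PROOFS =====

-- proof-side abbreviations
def pvKey (s : List Int) : Int := PySem.List.pyGetD s 0 0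
def pvOut (s : List Int) : Int := PySem.List.pyGetD s 1 0
-- outputs recorded against key k
def pvCnt (k : Int) (ts : List (List Int)) : List Int :=
  (ts.filter (fun s => pvKey s == k)).map pvOut
-- replay a list of outputs into one inner counting dict
def pvBump (i : PySem.Dict Int Int) (os : List Int) : PySem.Dict Int Int :=
  os.foldl (fun i o => i.insert o (i.getD o 0 + 1)) i

theorem aCountStep_eq_altStep (d : PySem.Dict Int (PySem.Dict Int Int)) (s : List Int) :
    aCountStep d s = altStep d s := by
  unfold aCountStep altStep
  by_cases h : (d.getD (PySem.List.pyGetD s 0 0) PySem.Dict.empty).contains (PySem.List.pyGetD s 1 0) = true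
  · simp [h, PySem.Dict.modify]
  · rw [Bool.not_eq_true] at h
    simp [h, PySem.Dict.getD_of_not_contains _ _ h]

theorem altStep_eq_lambda :
    altStep = fun (d : PySem.Dict Int (PySem.Dict Int Int)) (s : List Int) =>
      d.insert (pvKey s)
        ((d.getD (pvKey s) PySem.Dict.empty).insert (pvOut s)
          ((d.getD (pvKey s) PySem.Dict.empty).getD (pvOut s) 0 + 1)) := rfl

theorem get?_foldl_altStep (ts : List (List Int)) (d : PySem.Dict Int (PySem.Dict Int Int)) (k : Int) :
    (ts.foldl altStep d).get? k =
      if pvCnt k ts = [] then d.get? k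
      else some (pvBump (d.getD k PySem.Dict.empty) (pvCnt k ts)) := by
  induction ts generalizing d with
  | nil => simp [pvCnt]
  | cons s rest ih =>
    rw [List.foldl_cons, ih]
    by_cases hk : pvKey s = k
    · have hfilter : pvCnt k (s :: rest) = pvOut s :: pvCnt k rest := by
        simp [pvCnt, hk]
      have hget : (altStep d s).get? k =
          some ((d.getD k PySem.Dict.empty).insert (pvOut s)
            ((d.getD k PySem.Dict.empty).getD (pvOut s) 0 + 1)) := by
        rw [altStep_eq_lambda]
        simp [hk]
      have hgetD : (altStep d s).getD k PySem.Dict.empty =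
          (d.getD k PySem.Dict.empty).insert (pvOut s)
            ((d.getD k PySem.Dict.empty).getD (pvOut s) 0 + 1) := by
        rw [PySem.Dict.getD_eq_get?_getD, hget]; rfl
      rw [hfilter]
      by_cases hr : pvCnt k rest = []
      · simp [hr, hget, pvBump]
      · simp only [hr, if_false, reduceCtorEq, hgetD]
        rfl
    · have hfilter : pvCnt k (s :: rest) = pvCnt k rest := by
        simp [pvCnt, hk]
      have hget : (altStep d s).get? k = d.get? k := by
        rw [altStep_eq_lambda]
        simp [PySem.Dict.get?_insert, Ne.symm hk]
      have hgetD : (altStep d s).getD k PySem.Dict.empty = d.getD k PySem.Dict.empty := by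
        rw [PySem.Dict.getD_eq_get?_getD, hget, PySem.Dict.getD_eq_get?_getD]
      rw [hfilter, hget, hgetD]

theorem get?_foldl_aKeyStep (ts : List (List Int)) (d : PySem.Dict Int (PySem.Dict Int Int)) (k : Int) :
    (ts.foldl aKeyStep d).get? k =
      if k ∈ ts.map pvKey then some PySem.Dict.empty else d.get? k := by
  induction ts generalizing d with
  | nil => simp
  | cons s rest ih =>
    rw [List.foldl_cons, ih]
    by_cases hk : k ∈ rest.map pvKey
    · simp [hk]
    · by_cases hk0 : pvKey s = k
      · simp [hk, aKeyStep, pvKey, PySem.Dict.get?_insert]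
      · simp [hk, aKeyStep, pvKey, PySem.Dict.get?_insert]

theorem pvCnt_eq_nil_iff (k : Int) (ts : List (List Int)) :
    pvCnt k ts = [] ↔ k ∉ ts.map pvKey := by
  simp only [pvCnt, List.map_eq_nil_iff, List.filter_eq_nil_iff, List.mem_map]
  constructor
  · rintro h ⟨s, hs, hks⟩
    exact absurd (by simp [hks]) (h s hs)
  · intro h s hs
    simp only [beq_iff_eq]
    exact fun hks => h ⟨s, hs, hks⟩

theorem keys_foldl_altStep (ts : List (List Int)) (d : PySem.Dict Int (PySem.Dict Int Int)) :
    (ts.foldl altStep d).keys = PySem.Set.update d.keys (ts.map pvKey) := by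
  rw [altStep_eq_lambda]
  exact PySem.Dict.keys_foldl_insert_key ts pvKey _ d

theorem keys_foldl_aKeyStep (ts : List (List Int)) (d : PySem.Dict Int (PySem.Dict Int Int)) :
    (ts.foldl aKeyStep d).keys = PySem.Set.update d.keys (ts.map pvKey) := by
  exact PySem.Dict.keys_foldl_insert_key ts pvKey (fun _ _ => PySem.Dict.empty) d

theorem nodup_keys_foldl_altStep (ts : List (List Int)) (d : PySem.Dict Int (PySem.Dict Int Int))
    (h : d.keys.Nodup) : (ts.foldl altStep d).keys.Nodup := by
  rw [altStep_eq_lambda]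
  exact PySem.Dict.nodup_keys_foldl_insert_key ts pvKey _ d h

theorem set_update_ofList_self {l : List Int} :
    PySem.Set.update (PySem.Set.ofList l) l = PySem.Set.ofList l := by
  rw [PySem.Set.update_eq_append_filter]
  have : List.filter (fun y => !(PySem.Set.ofList l).contains y) (PySem.Set.ofList l) = [] := by
    rw [List.filter_eq_nil_iff]
    intro a ha
    simp only [Bool.not_eq_true', PySem.Set.contains_eq_listContains]
    simpa using ha
  rw [this, List.append_nil]

-- the two builds produce the same dict
theorem builds_eq (ts : List (List Int)) :
    ts.foldl aCountStep (ts.foldl aKeyStep PySem.Dict.empty) = ts.foldl altStep PySem.Dict.empty := by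
  have hstep : ts.foldl aCountStep (ts.foldl aKeyStep PySem.Dict.empty)
      = ts.foldl altStep (ts.foldl aKeyStep PySem.Dict.empty) :=
    PySem.List.foldl_congr_mem ts _ _ _ (fun acc x _ => aCountStep_eq_altStep acc x)
  rw [hstep]
  have hkeys1 : (ts.foldl aKeyStep (PySem.Dict.empty :
      PySem.Dict Int (PySem.Dict Int Int))).keys = PySem.Set.ofList (ts.map pvKey) := by
    rw [keys_foldl_aKeyStep, PySem.Dict.keys_empty]
    rfl
  have hkeysA : (ts.foldl altStep (ts.foldl aKeyStep (PySem.Dict.empty :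
      PySem.Dict Int (PySem.Dict Int Int)))).keys = PySem.Set.ofList (ts.map pvKey) := by
    rw [keys_foldl_altStep, hkeys1, set_update_ofList_self]
  have hkeysB : (ts.foldl altStep (PySem.Dict.empty :
      PySem.Dict Int (PySem.Dict Int Int))).keys = PySem.Set.ofList (ts.map pvKey) := by
    rw [keys_foldl_altStep, PySem.Dict.keys_empty]
    rfl
  have hndA : (ts.foldl altStep (ts.foldl aKeyStep (PySem.Dict.empty :
      PySem.Dict Int (PySem.Dict Int Int)))).keys.Nodup := by
    rw [hkeysA]; exact PySem.Set.nodup_ofList _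
  have hndB : (ts.foldl altStep (PySem.Dict.empty :
      PySem.Dict Int (PySem.Dict Int Int))).keys.Nodup := by
    rw [hkeysB]; exact PySem.Set.nodup_ofList _
  have hget : ∀ k, (ts.foldl altStep (ts.foldl aKeyStep (PySem.Dict.empty :
      PySem.Dict Int (PySem.Dict Int Int)))).get? k
      = (ts.foldl altStep (PySem.Dict.empty : PySem.Dict Int (PySem.Dict Int Int))).get? k := by
    intro k
    rw [get?_foldl_altStep, get?_foldl_altStep]
    by_cases hc : pvCnt k ts = []
    · have hk : k ∉ ts.map pvKey := (pvCnt_eq_nil_iff k ts).mp hc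
      rw [if_pos hc, if_pos hc, get?_foldl_aKeyStep, if_neg hk]
    · have hk : k ∈ ts.map pvKey := by
        by_contra hk
        exact hc ((pvCnt_eq_nil_iff k ts).mpr hk)
      have h1 : (ts.foldl aKeyStep (PySem.Dict.empty :
          PySem.Dict Int (PySem.Dict Int Int))).getD k PySem.Dict.empty = PySem.Dict.empty := by
        rw [PySem.Dict.getD_eq_get?_getD, get?_foldl_aKeyStep, if_pos hk]; rfl
      rw [if_neg hc, if_neg hc, h1]
      rw [PySem.Dict.getD_eq_get?_getD, PySem.Dict.get?_empty]
      rfl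
  apply PySem.Dict.ext
  rw [PySem.Dict.items_eq_map_keys _ hndA PySem.Dict.empty,
      PySem.Dict.items_eq_map_keys _ hndB PySem.Dict.empty, hkeysA, hkeysB]
  apply List.map_congr_left
  intro k _
  rw [PySem.Dict.getD_eq_get?_getD, PySem.Dict.getD_eq_get?_getD, hget k]

theorem insert_items_ne_nil {d : PySem.Dict Int Int} {k v : Int} :
    (d.insert k v).items ≠ [] := by
  rw [PySem.Dict.items_insert]
  by_cases h : d.contains k = true
  · rw [if_pos h]
    intro hnil
    rw [List.map_eq_nil_iff] at hnil
    rw [PySem.Dict.contains_iff_mem_keys] at h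
    simp only [PySem.Dict.keys, hnil, List.map_nil, List.not_mem_nil] at h
  · rw [if_neg h]
    simp

theorem pvBump_items_ne_nil (os : List Int) (i : PySem.Dict Int Int) (h : os ≠ []) :
    (pvBump i os).items ≠ [] := by
  induction os generalizing i with
  | nil => exact absurd rfl h
  | cons o rest ih =>
    show (pvBump (i.insert o (i.getD o 0 + 1)) rest).items ≠ []
    cases rest with
    | nil => exact insert_items_ne_nil
    | cons r rs => exact ih _ (by simp)

-- every group in the built dict is nonempty
theorem items_ne_nil_of_mem (ts : List (List Int)) (p : Int × PySem.Dict Int Int)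
    (hp : p ∈ (ts.foldl altStep PySem.Dict.empty).items) : p.2.items ≠ [] := by
  have hnd : (ts.foldl altStep (PySem.Dict.empty :
      PySem.Dict Int (PySem.Dict Int Int))).keys.Nodup :=
    nodup_keys_foldl_altStep ts _ (by rw [PySem.Dict.keys_empty]; exact List.nodup_nil)
  have hget : (ts.foldl altStep (PySem.Dict.empty :
      PySem.Dict Int (PySem.Dict Int Int))).get? p.1 = some p.2 :=
    PySem.Dict.get?_of_mem_items _ (by exact hp) hnd
  rw [get?_foldl_altStep] at hget
  by_cases hc : pvCnt p.1 ts = []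
  · rw [if_pos hc, PySem.Dict.get?_empty] at hget
    exact absurd hget (by simp)
  · rw [if_neg hc] at hget
    have : p.2 = pvBump PySem.Dict.empty (pvCnt p.1 ts) := by
      injection hget.symm
    rw [this]
    exact pvBump_items_ne_nil _ _ hc

-- invariant of the streaming max-with-tie scan
theorem altScan_inv (rest : List (Int × Int)) :
    ∀ (p : List (Int × Int)) (bk bc : Int) (tie : Bool),
    (∀ kv ∈ p, kv.2 ≤ bc) →
    ((p.filter (fun kv => kv.2 == bc)).map (·.1)).head? = some bk →
    tie = decide (1 < (p.filter (fun kv => kv.2 == bc)).length) →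
    (rest.foldl altScan (bk, bc, tie)).2.1 = (rest.map (·.2)).foldl max bc ∧
    (∀ kv ∈ (p ++ rest), kv.2 ≤ (rest.foldl altScan (bk, bc, tie)).2.1) ∧
    (((p ++ rest).filter (fun kv => kv.2 == (rest.foldl altScan (bk, bc, tie)).2.1)).map
        (·.1)).head? = some (rest.foldl altScan (bk, bc, tie)).1 ∧
    (rest.foldl altScan (bk, bc, tie)).2.2 =
      decide (1 < ((p ++ rest).filter (fun kv => kv.2 == (rest.foldl altScan (bk, bc, tie)).2.1)).length) := by
  induction rest with
  | nil =>
    intro p bk bc tie h1 h2 h3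
    rw [List.foldl_nil, List.append_nil, List.map_nil, List.foldl_nil]
    exact ⟨rfl, h1, h2, h3⟩
  | cons kv r ih =>
    intro p bk bc tie h1 h2 h3
    rw [List.foldl_cons]
    rcases lt_trichotomy bc kv.2 with hlt | heq | hgt
    · have hstep : altScan (bk, bc, tie) kv = (kv.1, kv.2, false) := by
        simp [altScan, hlt]
      rw [hstep]
      have hfp : p.filter (fun x => x.2 == kv.2) = [] := by
        rw [List.filter_eq_nil_iff]
        intro a ha
        have := h1 a ha
        simp only [beq_iff_eq]
        omega
      have h1' : ∀ x ∈ p ++ [kv], x.2 ≤ kv.2 := by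
        intro x hx
        rcases List.mem_append.mp hx with hx | hx
        · exact le_of_lt (lt_of_le_of_lt (h1 x hx) hlt)
        · simp at hx; rw [hx]
      have h2' : (((p ++ [kv]).filter (fun x => x.2 == kv.2)).map (·.1)).head? = some kv.1 := by
        simp [List.filter_append, hfp]
      have h3' : (false : Bool) = decide (1 < ((p ++ [kv]).filter (fun x => x.2 == kv.2)).length) := by
        simp [List.filter_append, hfp]
      have := ih (p ++ [kv]) kv.1 kv.2 false h1' h2' h3'
      rw [List.append_assoc] at this
      simp only [List.singleton_append] at this
      refine ⟨?_, this.2.1, this.2.2.1, this.2.2.2⟩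
      rw [this.1, List.map_cons, List.foldl_cons, max_eq_right (le_of_lt hlt)]
    · have hstep : altScan (bk, bc, tie) kv = (bk, bc, true) := by
        simp [altScan, heq.symm]
      rw [hstep]
      have hne : p.filter (fun x => x.2 == bc) ≠ [] := by
        intro hnil
        rw [hnil] at h2
        simp at h2
      have h1' : ∀ x ∈ p ++ [kv], x.2 ≤ bc := by
        intro x hx
        rcases List.mem_append.mp hx with hx | hx
        · exact h1 x hx
        · simp at hx; rw [hx, heq]
      have h2' : (((p ++ [kv]).filter (fun x => x.2 == bc)).map (·.1)).head? = some bk := by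
        rw [List.filter_append, List.map_append, List.head?_append_of_ne_nil, h2]
        simpa using hne
      have h3' : (true : Bool) = decide (1 < ((p ++ [kv]).filter (fun x => x.2 == bc)).length) := by
        rw [List.filter_append, List.length_append]
        have hlen : 1 ≤ (p.filter (fun x => x.2 == bc)).length :=
          List.length_pos_of_ne_nil hne
        have : (([kv] : List (Int × Int)).filter (fun x => x.2 == bc)).length = 1 := by
          simp [List.filter, heq]
        rw [this]
        have h01 : 1 < (p.filter (fun x => x.2 == bc)).length + 1 := by omega
        simp [h01]
      have := ih (p ++ [kv]) bk bc true h1' h2' h3'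
      rw [List.append_assoc] at this
      simp only [List.singleton_append] at this
      refine ⟨?_, this.2.1, this.2.2.1, this.2.2.2⟩
      rw [this.1, List.map_cons, List.foldl_cons, max_eq_left (le_of_eq heq.symm)]
    · have hstep : altScan (bk, bc, tie) kv = (bk, bc, tie) := by
        dsimp only [altScan]
        rw [if_neg (by omega), if_neg (by omega)]
      rw [hstep]
      have h1' : ∀ x ∈ p ++ [kv], x.2 ≤ bc := by
        intro x hx
        rcases List.mem_append.mp hx with hx | hx
        · exact h1 x hx
        · simp at hx; rw [hx]; exact le_of_lt hgt
      have hfkv : (([kv] : List (Int × Int)).filter (fun x => x.2 == bc)) = [] := by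
        have hb : (kv.2 == bc) = false := by simp; omega
        simp [List.filter, hb]
      have h2' : (((p ++ [kv]).filter (fun x => x.2 == bc)).map (·.1)).head? = some bk := by
        rw [List.filter_append, hfkv, List.append_nil]
        exact h2
      have h3' : tie = decide (1 < ((p ++ [kv]).filter (fun x => x.2 == bc)).length) := by
        rw [List.filter_append, hfkv, List.append_nil]
        exact h3
      have := ih (p ++ [kv]) bk bc tie h1' h2' h3'
      rw [List.append_assoc] at this
      simp only [List.singleton_append] at this
      refine ⟨?_, this.2.1, this.2.2.1, this.2.2.2⟩
      rw [this.1, List.map_cons, List.foldl_cons, max_eq_left (le_of_lt hgt)]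

-- the two per-group bodies agree on every nonempty group
theorem group_steps_eq (acc : PySem.Set Int × PySem.Set (Int × Int))
    (it : Int × PySem.Dict Int Int) (h : it.2.items ≠ []) :
    aGroupStep acc it = altGroupStep acc it := by
  obtain ⟨kv0, rest, hitems⟩ := List.exists_cons_of_ne_nil h
  have hvalues : it.2.values = kv0.2 :: rest.map (·.2) := by
    show it.2.items.map (·.2) = _
    rw [hitems, List.map_cons]
  have hmax : (PySem.List.max? it.2.values (fun v => v)).getD 0 = (rest.map (·.2)).foldl max kv0.2 := by
    rw [hvalues, PySem.List.max?_id_cons]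
    rfl
  have hinv := altScan_inv rest [kv0] kv0.1 kv0.2 false
    (by intro kv hkv; simp at hkv; rw [hkv])
    (by simp) (by simp)
  set st := rest.foldl altScan (kv0.1, kv0.2, false) with hst
  have hL : ([kv0] : List (Int × Int)) ++ rest = it.2.items := by rw [hitems]; rfl
  rw [hL] at hinv
  have hmaxst : (PySem.List.max? it.2.values (fun v => v)).getD 0 = st.2.1 := by
    rw [hmax, hinv.1]
  unfold aGroupStep altGroupStep
  rw [hitems]
  simp only [← hitems, hmaxst, ← hst]
  rcases htie : st.2.2 with _ | _
  · -- no tie: exactly one maximal key, and it is st.1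
    rw [htie] at hinv
    have hlen : ¬ (1 < ((it.2.items.filter (fun kv => kv.2 == st.2.1))).length) := by
      have := hinv.2.2.2
      simp only [false_eq_decide_iff] at this
      exact this
    have hne : (it.2.items.filter (fun kv => kv.2 == st.2.1)) ≠ [] := by
      intro hnil
      rw [hnil] at hinv
      simp at hinv
    obtain ⟨a, as, hfe⟩ := List.exists_cons_of_ne_nil hne
    have has : as = [] := by
      rw [hfe] at hlen
      cases as with
      | nil => rfl
      | cons b bs => simp at hlen
    rw [has] at hfe
    have hhead : a.1 = st.1 := by
      have := hinv.2.2.1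
      rw [hfe] at this
      simpa using this
    rw [hfe]
    simp only [List.map_cons, List.map_nil, List.length_cons, List.length_nil]
    rw [if_neg (by omega)]
    rw [PySem.List.pyGetD_zero_cons, hhead]
    simp
  · -- tie: more than one maximal key
    rw [htie] at hinv
    have hlen : 1 < ((it.2.items.filter (fun kv => kv.2 == st.2.1))).length := by
      have := hinv.2.2.2
      simp only [true_eq_decide_iff] at this
      exact this
    rw [if_pos (by rw [List.length_map]; exact hlen)]
    simp

-- ===== VERDICT (by name: the statement is the Claim_ definition above) =====
theorem check_outgoing_quorum_spec : Claim_equal_check_outgoing_quorum := by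
  intro ts _ _
  show check_outgoing_quorum ts = check_outgoing_quorum_alt ts
  show (List.foldl aCountStep (List.foldl aKeyStep PySem.Dict.empty ts) ts).items.foldl
      aGroupStep (PySem.Set.empty, PySem.Set.empty)
    = (List.foldl altStep PySem.Dict.empty ts).items.foldl altGroupStep
      (PySem.Set.empty, PySem.Set.empty)
  rw [builds_eq]
  exact PySem.List.foldl_congr_mem _ _ _ _
    (fun acc x hx => group_steps_eq acc x (items_ne_nil_of_mem ts x hx))
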